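-- pv_equiv track=rewrite | github.com/olalamozarella/advent202x | dieciseis.py | calculate_possibilities
-- ===== SOURCE A (Python) =====
-- def calculate_possibilities(categories, my_ticket, valid_other_tickets):
--     # each category is possible for each column at the beginning
--     possibilities = [list(range(0, len(categories))) for column in my_ticket]
--     # loop over all tickets (my + other), check if each column is valid
--     for ticket in valid_other_tickets:
--         for column, number in enumerate(ticket):
--             for cat_index, category in enumerate(categories):
--                 if (category[1] <= ticket[column] <= category[2]) or (category[3] <= ticket[column] <= category[4]):
--                     pass
--                 else:
--                     possibilities[column][cat_index] = -1
--     return possibilities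
-- ===== SOURCE B (Python) =====
-- def calculate_possibilities(categories, my_ticket, valid_other_tickets):
--     # column-major: collect each column's values once, then decide every category
--     # for that column in one pass with all(); builds the result directly, no mutation
--     result = []
--     for c in range(len(my_ticket)):
--         col = [t[c] for t in valid_other_tickets if c < len(t)]
--         result.append([i if all((cat[1] <= v <= cat[2]) or (cat[3] <= v <= cat[4]) for v in col)
--                        else -1
--                        for i, cat in enumerate(categories)])
--     return result
-- ===== Notes on version B (the rewrite author's own statement) =====
-- stated objective: alternative
-- what changed: Ticket-major triple loop that mutates a prebuilt possibilities matrix is replaced by a column-major construction: each column's values are collected once and each category is decided with one all() pass, building the result rows directly with no mutation.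
import Mathlib
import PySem

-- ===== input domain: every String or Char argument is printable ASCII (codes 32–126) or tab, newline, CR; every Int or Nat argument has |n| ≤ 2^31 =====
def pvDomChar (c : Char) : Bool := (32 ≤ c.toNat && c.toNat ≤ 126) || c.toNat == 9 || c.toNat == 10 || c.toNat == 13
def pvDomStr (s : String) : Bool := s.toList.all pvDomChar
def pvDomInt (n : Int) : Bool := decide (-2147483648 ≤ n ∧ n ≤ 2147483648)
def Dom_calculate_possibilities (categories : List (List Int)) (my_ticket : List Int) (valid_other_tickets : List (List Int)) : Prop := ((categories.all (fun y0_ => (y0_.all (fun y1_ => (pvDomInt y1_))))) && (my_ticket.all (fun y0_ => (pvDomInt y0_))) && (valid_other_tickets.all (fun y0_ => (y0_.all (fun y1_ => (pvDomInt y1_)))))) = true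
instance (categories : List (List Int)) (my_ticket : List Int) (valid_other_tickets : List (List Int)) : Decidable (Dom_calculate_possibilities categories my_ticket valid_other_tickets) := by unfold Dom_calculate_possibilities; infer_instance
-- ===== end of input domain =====

-- B rebuilds the answer column-major (collect each column's values once, one all()
-- pass per category) instead of A's ticket-major triple loop mutating a prebuilt matrix.

-- ===== PORT A =====
def calculate_possibilities (categories : List (List Int)) (my_ticket : List Int) (valid_other_tickets : List (List Int)) : List (List Int) :=
  let possibilities := my_ticket.map (fun _ => PySem.List.pyRange 0 (categories.length : Int) 1)
  valid_other_tickets.foldl (fun possibilities ticket =>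
    (PySem.List.enumerate ticket 0).foldl (fun possibilities cn =>
      (PySem.List.enumerate categories 0).foldl (fun possibilities ic =>
        if (PySem.List.pyGetD ic.2 1 0 ≤ PySem.List.pyGetD ticket cn.1 0 ∧
              PySem.List.pyGetD ticket cn.1 0 ≤ PySem.List.pyGetD ic.2 2 0) ∨
           (PySem.List.pyGetD ic.2 3 0 ≤ PySem.List.pyGetD ticket cn.1 0 ∧
              PySem.List.pyGetD ticket cn.1 0 ≤ PySem.List.pyGetD ic.2 4 0) then
          possibilities
        else
          PySem.List.pySetD possibilities cn.1
            (PySem.List.pySetD (PySem.List.pyGetD possibilities cn.1 []) ic.1 (-1)))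
        possibilities)
      possibilities)
    possibilities

-- ===== PORT B =====
def calculate_possibilities_alt (categories : List (List Int)) (my_ticket : List Int) (valid_other_tickets : List (List Int)) : List (List Int) :=
  (List.range my_ticket.length).map (fun c =>
    let col := (valid_other_tickets.filter (fun t => decide (c < t.length))).map (fun t => t.getD c 0)
    (PySem.List.enumerate categories 0).map (fun ic =>
      if col.all (fun v =>
           decide ((PySem.List.pyGetD ic.2 1 0 ≤ v ∧ v ≤ PySem.List.pyGetD ic.2 2 0) ∨
                   (PySem.List.pyGetD ic.2 3 0 ≤ v ∧ v ≤ PySem.List.pyGetD ic.2 4 0))) then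
        ic.1
      else -1))

-- ===== PRECONDITION & SPEC =====
-- Pre_ is exactly the inputs on which A returns (no IndexError): for every ticket
-- value v and category record, the fields A actually reads exist (category[1],
-- then [2] only if category[1] <= v, then [3]/[4] only if the first range fails),
-- and the column index is inside my_ticket whenever A performs the assignment.
def Pre_calculate_possibilities (categories : List (List Int)) (my_ticket : List Int) (valid_other_tickets : List (List Int)) : Prop :=
  ∀ t ∈ valid_other_tickets, ∀ k < t.length, ∀ cat ∈ categories,
    (2 ≤ cat.length ∧ (cat.getD 1 0 ≤ t.getD k 0 → 3 ≤ cat.length)) ∧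
    (¬ (cat.getD 1 0 ≤ t.getD k 0 ∧ t.getD k 0 ≤ cat.getD 2 0) →
      (4 ≤ cat.length ∧ (cat.getD 3 0 ≤ t.getD k 0 → 5 ≤ cat.length)) ∧
      (¬ (cat.getD 3 0 ≤ t.getD k 0 ∧ t.getD k 0 ≤ cat.getD 4 0) → k < my_ticket.length))
instance (categories : List (List Int)) (my_ticket : List Int) (valid_other_tickets : List (List Int)) : Decidable (Pre_calculate_possibilities categories my_ticket valid_other_tickets) := by unfold Pre_calculate_possibilities; infer_instance

def pvWitness_calculate_possibilities : List (List Int) × List Int × List (List Int) :=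
  ([[0, 1, 5, 7, 9], [0, 2, 3, 8, 9]], [3, 8], [[3, 8], [6, 9]])

def Spec_calculate_possibilities (categories : List (List Int)) (my_ticket : List Int) (valid_other_tickets : List (List Int)) (out : List (List Int)) : Prop := out = calculate_possibilities_alt categories my_ticket valid_other_tickets
instance (categories : List (List Int)) (my_ticket : List Int) (valid_other_tickets : List (List Int)) (out : List (List Int)) : Decidable (Spec_calculate_possibilities categories my_ticket valid_other_tickets out) := by unfold Spec_calculate_possibilities; infer_instance

-- ===== CLAIM (what is proved, stated in full; the proofs are below) =====
def Claim_equal_calculate_possibilities : Prop := ∀ (categories : List (List Int)) (my_ticket : List Int) (valid_other_tickets : List (List Int)), Dom_calculate_possibilities categories my_ticket valid_other_tickets → Pre_calculate_possibilities categories my_ticket valid_other_tickets → Spec_calculate_possibilities categories my_ticket valid_other_tickets (calculate_possibilities categories my_ticket valid_other_tickets)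

-- ===== LEMMAS AND PROOFS =====

-- the range test both programs perform, as a Bool
def pvOk (cat : List Int) (v : Int) : Bool :=
  decide ((PySem.List.pyGetD cat 1 0 ≤ v ∧ v ≤ PySem.List.pyGetD cat 2 0) ∨
          (PySem.List.pyGetD cat 3 0 ≤ v ∧ v ≤ PySem.List.pyGetD cat 4 0))

-- category cat still possible for column c after the tickets ts
def pvGood (cat : List Int) (ts : List (List Int)) (c : Nat) : Bool :=
  ts.all (fun t => !(decide (c < t.length)) || pvOk cat (t.getD c 0))

-- the common normal form of both programs' results
def pvSpec (categories : List (List Int)) (ncols : Nat) (ts : List (List Int)) : List (List Int) :=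
  (List.range ncols).map (fun c =>
    (PySem.List.enumerate categories 0).map (fun ic => if pvGood ic.2 ts c then ic.1 else -1))

-- a row after absorbing one more value v for its column
def pvRowUpd (categories : List (List Int)) (row : List Int) (v : Int) : List Int :=
  (categories.zip row).map (fun p => if pvOk p.1 v then p.2 else -1)

-- A's innermost loop body over one ticket column (cn = (column, number))
def pvColStep (categories : List (List Int)) (ticket : List Int) (poss : List (List Int)) (cn : Int × Int) : List (List Int) :=
  (PySem.List.enumerate categories 0).foldl (fun possibilities ic =>
    if (PySem.List.pyGetD ic.2 1 0 ≤ PySem.List.pyGetD ticket cn.1 0 ∧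
          PySem.List.pyGetD ticket cn.1 0 ≤ PySem.List.pyGetD ic.2 2 0) ∨
       (PySem.List.pyGetD ic.2 3 0 ≤ PySem.List.pyGetD ticket cn.1 0 ∧
          PySem.List.pyGetD ticket cn.1 0 ≤ PySem.List.pyGetD ic.2 4 0) then
      possibilities
    else
      PySem.List.pySetD possibilities cn.1
        (PySem.List.pySetD (PySem.List.pyGetD possibilities cn.1 []) ic.1 (-1)))
    poss

theorem pv_A_fold (categories : List (List Int)) (my_ticket : List Int) (vot : List (List Int)) :
    calculate_possibilities categories my_ticket vot
      = vot.foldl (fun poss ticket => (PySem.List.enumerate ticket 0).foldl (pvColStep categories ticket) poss)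
          (my_ticket.map (fun _ => PySem.List.pyRange 0 (categories.length : Int) 1)) := rfl

theorem pv_B_eq (categories : List (List Int)) (my_ticket : List Int) (vot : List (List Int)) :
    calculate_possibilities_alt categories my_ticket vot = pvSpec categories my_ticket.length vot := by
  unfold calculate_possibilities_alt pvSpec
  apply List.map_congr_left
  intro c _
  apply List.map_congr_left
  intro ic _
  congr 1
  simp [List.all_filter, List.all_map, pvGood, pvOk, Function.comp]

-- the innermost loop, restricted to the single row it touches
theorem pv_rowfold (v : Int) (cats : List (List Int)) :
    ∀ (s : Nat) (pre row : List Int), pre.length = s → cats.length = row.length →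
    (PySem.List.enumerate cats (s : Int)).foldl
      (fun r ic => if (PySem.List.pyGetD ic.2 1 0 ≤ v ∧ v ≤ PySem.List.pyGetD ic.2 2 0) ∨
                      (PySem.List.pyGetD ic.2 3 0 ≤ v ∧ v ≤ PySem.List.pyGetD ic.2 4 0) then r
                   else PySem.List.pySetD r ic.1 (-1)) (pre ++ row)
      = pre ++ (cats.zip row).map (fun p => if pvOk p.1 v then p.2 else -1) := by
  induction cats with
  | nil => intro s pre row hs hlen; cases row <;> simp_all [PySem.List.enumerate_nil]
  | cons cat cs ih =>
    intro s pre row hs hlen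
    cases row with
    | nil => simp at hlen
    | cons y ys =>
      rw [PySem.List.enumerate_cons, List.foldl_cons]
      have hcast : (s : Int) + 1 = ((s + 1 : Nat) : Int) := by push_cast; ring
      by_cases h : (PySem.List.pyGetD cat 1 0 ≤ v ∧ v ≤ PySem.List.pyGetD cat 2 0) ∨
                   (PySem.List.pyGetD cat 3 0 ≤ v ∧ v ≤ PySem.List.pyGetD cat 4 0)
      · rw [if_pos h]
        have hok : pvOk cat v = true := by simp [pvOk, h]
        have := ih (s + 1) (pre ++ [y]) ys (by simp [hs]) (by simpa using hlen)
        rw [hcast] at *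
        simpa [hok] using this
      · rw [if_neg h]
        have hok : pvOk cat v = false := by simp only [pvOk, decide_eq_false_iff_not]; exact h
        rw [PySem.List.pySetD_natCast, List.set_append, if_neg (by omega)]
        have : (y :: ys).set (s - pre.length) (-1) = (-1 :: ys) := by
          rw [hs]; simp
        rw [this]
        have := ih (s + 1) (pre ++ [-1]) ys (by simp [hs]) (by simpa using hlen)
        rw [hcast] at *
        simpa [hok] using this

-- the matrix-level inner loop is a pySetD of the row-level loop
theorem pv_catfold (ticket : List Int) (n : Nat) (cats : List (List Int)) :
    ∀ (s : Int) (poss : List (List Int)),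
    (PySem.List.enumerate cats (s : Int)).foldl (fun possibilities ic =>
        if (PySem.List.pyGetD ic.2 1 0 ≤ PySem.List.pyGetD ticket (n : Int) 0 ∧
              PySem.List.pyGetD ticket (n : Int) 0 ≤ PySem.List.pyGetD ic.2 2 0) ∨
           (PySem.List.pyGetD ic.2 3 0 ≤ PySem.List.pyGetD ticket (n : Int) 0 ∧
              PySem.List.pyGetD ticket (n : Int) 0 ≤ PySem.List.pyGetD ic.2 4 0) then
          possibilities
        else
          PySem.List.pySetD possibilities (n : Int)
            (PySem.List.pySetD (PySem.List.pyGetD possibilities (n : Int) []) ic.1 (-1))) poss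
      = PySem.List.pySetD poss (n : Int)
          ((PySem.List.enumerate cats (s : Int)).foldl
            (fun r ic => if (PySem.List.pyGetD ic.2 1 0 ≤ PySem.List.pyGetD ticket (n : Int) 0 ∧
                              PySem.List.pyGetD ticket (n : Int) 0 ≤ PySem.List.pyGetD ic.2 2 0) ∨
                            (PySem.List.pyGetD ic.2 3 0 ≤ PySem.List.pyGetD ticket (n : Int) 0 ∧
                              PySem.List.pyGetD ticket (n : Int) 0 ≤ PySem.List.pyGetD ic.2 4 0) then r
                         else PySem.List.pySetD r ic.1 (-1))
            (PySem.List.pyGetD poss (n : Int) [])) := by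
  have base : ∀ poss : List (List Int),
      PySem.List.pySetD poss (n : Int) (PySem.List.pyGetD poss (n : Int) []) = poss := by
    intro poss
    rw [PySem.List.pySetD_natCast, PySem.List.pyGetD_natCast]
    by_cases hc : n < poss.length
    · rw [List.getD_eq_getElem _ _ hc, List.set_getElem_self]
    · rw [List.set_eq_of_length_le (by omega)]
  induction cats with
  | nil => intro s poss; rw [PySem.List.enumerate_nil]; exact (base poss).symm
  | cons cat cs ih =>
    intro s poss
    rw [PySem.List.enumerate_cons, List.foldl_cons, List.foldl_cons]
    by_cases h : (PySem.List.pyGetD cat 1 0 ≤ PySem.List.pyGetD ticket (n : Int) 0 ∧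
                    PySem.List.pyGetD ticket (n : Int) 0 ≤ PySem.List.pyGetD cat 2 0) ∨
                 (PySem.List.pyGetD cat 3 0 ≤ PySem.List.pyGetD ticket (n : Int) 0 ∧
                    PySem.List.pyGetD ticket (n : Int) 0 ≤ PySem.List.pyGetD cat 4 0)
    · rw [if_pos h, if_pos h]
      exact ih (s + 1) poss
    · rw [if_neg h, if_neg h, ih]
      by_cases hc : n < poss.length
      · have hget : PySem.List.pyGetD
            (PySem.List.pySetD poss (n : Int)
              (PySem.List.pySetD (PySem.List.pyGetD poss (n : Int) []) (s : Int) (-1))) (n : Int) []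
            = PySem.List.pySetD (PySem.List.pyGetD poss (n : Int) []) (s : Int) (-1) := by
          rw [PySem.List.pySetD_natCast, PySem.List.pyGetD_natCast,
              List.getD_eq_getElem _ _ (by simpa using hc), List.getElem_set, if_pos rfl]
        rw [hget, PySem.List.pySetD_natCast, PySem.List.pySetD_natCast, PySem.List.pySetD_natCast,
            List.set_set, ← PySem.List.pySetD_natCast]
      · have hno : ∀ r, PySem.List.pySetD poss (n : Int) r = poss := by
          intro r; rw [PySem.List.pySetD_natCast, List.set_eq_of_length_le (by omega)]
        rw [hno, hno, hno]

theorem pv_ticket (categories : List (List Int)) (t : List Int) :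
    ∀ (u w : List Int) (poss : List (List Int)), t = u ++ w →
      (∀ r ∈ poss, r.length = categories.length) →
    (PySem.List.enumerate u 0).foldl (pvColStep categories t) poss
      = poss.mapIdx (fun c row => if c < u.length then pvRowUpd categories row (t.getD c 0) else row) := by
  intro u
  induction u using List.reverseRecOn with
  | nil =>
    intro w poss _ _
    rw [PySem.List.enumerate_nil, List.foldl_nil]
    apply List.ext_getElem
    · simp
    · intro i h1 h2; simp [List.getElem_mapIdx]
  | append_singleton u0 x ih =>
    intro w poss ht hrows
    rw [PySem.List.enumerate_append, List.foldl_append]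
    have hsing : PySem.List.enumerate [x] (0 + (u0.length : Int)) = [((u0.length : Int), x)] := by
      rw [PySem.List.enumerate_cons, PySem.List.enumerate_nil]; norm_num
    rw [hsing, List.foldl_cons, List.foldl_nil,
        ih (x :: w) poss (by simpa using ht) hrows]
    set n := u0.length with hn
    set P := poss.mapIdx (fun c row => if c < n then pvRowUpd categories row (t.getD c 0) else row) with hP
    have hlenP : P.length = poss.length := by rw [hP]; exact List.length_mapIdx
    have h1 : pvColStep categories t P ((n : Int), x)
        = PySem.List.pySetD P (n : Int)
            ((PySem.List.enumerate categories 0).foldl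
              (fun r ic => if (PySem.List.pyGetD ic.2 1 0 ≤ PySem.List.pyGetD t (n : Int) 0 ∧
                                PySem.List.pyGetD t (n : Int) 0 ≤ PySem.List.pyGetD ic.2 2 0) ∨
                              (PySem.List.pyGetD ic.2 3 0 ≤ PySem.List.pyGetD t (n : Int) 0 ∧
                                PySem.List.pyGetD t (n : Int) 0 ≤ PySem.List.pyGetD ic.2 4 0) then r
                           else PySem.List.pySetD r ic.1 (-1))
              (PySem.List.pyGetD P (n : Int) [])) := pv_catfold t n categories 0 P
    rw [h1]
    by_cases hc : n < poss.length
    · have hcP : n < P.length := by omega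
      have hrowP : PySem.List.pyGetD P (n : Int) [] = poss[n] := by
        rw [PySem.List.pyGetD_natCast, List.getD_eq_getElem _ _ hcP]
        simp [hP, List.getElem_mapIdx]
      have hlenrow : categories.length = poss[n].length :=
        (hrows poss[n] (List.getElem_mem hc)).symm
      have h2 := pv_rowfold (PySem.List.pyGetD t (n : Int) 0) categories 0 [] poss[n] rfl hlenrow
      rw [show ((0 : Nat) : Int) = (0 : Int) from rfl, List.nil_append] at h2
      rw [hrowP, h2]
      apply List.ext_getElem
      · simp [hlenP]
      · intro i hi1 hi2
        have hiP : i < poss.length := by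
          simp only [PySem.List.pySetD_natCast, List.length_set, hlenP] at hi1; exact hi1
        simp only [PySem.List.pySetD_natCast, List.getElem_set, hP, List.getElem_mapIdx,
                   List.length_append, List.length_cons, List.length_nil]
        by_cases hieq : n = i
        · subst hieq
          simp [pvRowUpd, hn]
        · by_cases hlt : i < n
          · simp [hieq, hlt, show i < u0.length + 1 by omega]
          · simp [hieq, hlt, show ¬ i < u0.length + 1 by omega]
    · rw [PySem.List.pySetD_natCast, List.set_eq_of_length_le (by omega)]
      apply List.ext_getElem
      · simp [hlenP]
      · intro i hi1 hi2
        have hiP : i < poss.length := by rwa [hlenP] at hi1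
        simp only [hP, List.getElem_mapIdx, List.length_append, List.length_cons, List.length_nil]
        have hin : i < n := by omega
        simp [hin, show i < u0.length + 1 by omega]

theorem pv_rowupd_map (v : Int) (cats : List (List Int)) :
    ∀ (s : Int) (g : Int × List Int → Int),
    pvRowUpd cats ((PySem.List.enumerate cats s).map g) v
      = (PySem.List.enumerate cats s).map (fun ic => if pvOk ic.2 v then g ic else -1) := by
  induction cats with
  | nil => intro s g; simp [PySem.List.enumerate_nil, pvRowUpd]
  | cons cat cs ih =>
    intro s g
    rw [PySem.List.enumerate_cons]
    simp only [List.map_cons, pvRowUpd, List.zip_cons_cons]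
    have := ih (s + 1) g
    simp only [pvRowUpd] at this
    rw [this]

theorem pv_step_spec (cats : List (List Int)) (ncols : Nat) (ts : List (List Int)) (t : List Int) :
    (pvSpec cats ncols ts).mapIdx (fun c row => if c < t.length then pvRowUpd cats row (t.getD c 0) else row)
      = pvSpec cats ncols (ts ++ [t]) := by
  apply List.ext_getElem
  · simp [pvSpec]
  · intro i h1 h2
    simp only [pvSpec, List.getElem_mapIdx, List.getElem_map, List.getElem_range] at *
    by_cases hi : i < t.length
    · rw [if_pos hi, pv_rowupd_map]
      apply List.map_congr_left
      intro ic _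
      have : pvGood ic.2 (ts ++ [t]) i = (pvGood ic.2 ts i && pvOk ic.2 (t.getD i 0)) := by
        simp [pvGood, List.all_append, hi]
      rw [this]
      by_cases hg : pvGood ic.2 ts i <;> by_cases ho : pvOk ic.2 (t.getD i 0) <;> simp [hg]
    · rw [if_neg hi]
      apply List.map_congr_left
      intro ic _
      have : pvGood ic.2 (ts ++ [t]) i = pvGood ic.2 ts i := by
        simp [pvGood, List.all_append, hi]
      rw [this]

theorem pv_init (cats : List (List Int)) (mt : List Int) :
    mt.map (fun _ => PySem.List.pyRange 0 (cats.length : Int) 1) = pvSpec cats mt.length [] := by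
  unfold pvSpec
  have : ∀ c : Nat, (PySem.List.enumerate cats 0).map (fun ic => if pvGood ic.2 [] c then ic.1 else -1)
      = PySem.List.pyRange 0 (cats.length : Int) 1 := by
    intro c
    have h1 : (PySem.List.enumerate cats 0).map (fun ic => if pvGood ic.2 [] c then ic.1 else -1)
        = (PySem.List.enumerate cats 0).map (fun ic => ic.1) := by
      apply List.map_congr_left; intro ic _; simp [pvGood]
    rw [h1, PySem.List.map_fst_enumerate]
    simp
  calc mt.map (fun _ => PySem.List.pyRange 0 (cats.length : Int) 1)
      = List.replicate mt.length (PySem.List.pyRange 0 (cats.length : Int) 1) := List.map_const' ..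
    _ = (List.range mt.length).map (fun c => (PySem.List.enumerate cats 0).map (fun ic => if pvGood ic.2 [] c then ic.1 else -1)) := by
        apply List.ext_getElem <;> simp [this]

theorem pv_rows_len (cats : List (List Int)) (ncols : Nat) (ts : List (List Int)) :
    ∀ r ∈ pvSpec cats ncols ts, r.length = cats.length := by
  intro r hr
  simp only [pvSpec, List.mem_map] at hr
  obtain ⟨c, -, rfl⟩ := hr
  simp [PySem.List.length_enumerate]

theorem pv_main (cats : List (List Int)) (ncols : Nat) :
    ∀ (vot ts : List (List Int)),
    vot.foldl (fun poss ticket => (PySem.List.enumerate ticket 0).foldl (pvColStep cats ticket) poss)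
      (pvSpec cats ncols ts) = pvSpec cats ncols (ts ++ vot) := by
  intro vot
  induction vot with
  | nil => intro ts; simp
  | cons t vots ih =>
    intro ts
    rw [List.foldl_cons]
    have h1 : (PySem.List.enumerate t 0).foldl (pvColStep cats t) (pvSpec cats ncols ts)
        = pvSpec cats ncols (ts ++ [t]) := by
      rw [pv_ticket cats t t [] _ (by simp) (pv_rows_len cats ncols ts), pv_step_spec]
    rw [h1, ih (ts ++ [t])]
    simp

-- ===== VERDICT (by name: the statement is the Claim_ definition above) =====
theorem calculate_possibilities_spec : Claim_equal_calculate_possibilities := by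
  intro categories my_ticket vot _ _
  unfold Spec_calculate_possibilities
  rw [pv_B_eq, pv_A_fold, pv_init, pv_main]
  simp
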